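-- pv_equiv track=rewrite | github.com/wingadium1/Cpp-to-Kotlin-porting-playbook | tools/lst/build_lst.py | byte_to_line
-- ===== SOURCE A (Python) =====
-- from typing import List, Optional, Tuple
--
-- def byte_to_line(pos: int, line_index: List[int]) -> int:
--     # 1-based lines
--     lo, hi = 0, len(line_index)-1
--     while lo <= hi:
--         mid = (lo+hi)//2
--         if line_index[mid] <= pos:
--             lo = mid + 1
--         else:
--             hi = mid - 1
--     return hi + 1
-- ===== SOURCE B (Python) =====
-- def byte_to_line(pos, line_index):
--     # 1-based lines: on a sorted line-start table, the line of byte `pos`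
--     # is the number of line starts at or before `pos`.
--     return sum(1 for x in line_index if x <= pos)
-- ===== Notes on version B (the rewrite author's own statement) =====
-- stated objective: simpler
-- what changed: Replaces the hand-written binary search over (lo,hi) bounds with a single linear pass that counts entries <= pos; on a table partitioned around pos (in particular any sorted line-start table) this count equals hi+1.
-- outside the precondition, e.g. on byte_to_line(0, [5, 0]): A returns 0, B returns 1
import Mathlib
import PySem

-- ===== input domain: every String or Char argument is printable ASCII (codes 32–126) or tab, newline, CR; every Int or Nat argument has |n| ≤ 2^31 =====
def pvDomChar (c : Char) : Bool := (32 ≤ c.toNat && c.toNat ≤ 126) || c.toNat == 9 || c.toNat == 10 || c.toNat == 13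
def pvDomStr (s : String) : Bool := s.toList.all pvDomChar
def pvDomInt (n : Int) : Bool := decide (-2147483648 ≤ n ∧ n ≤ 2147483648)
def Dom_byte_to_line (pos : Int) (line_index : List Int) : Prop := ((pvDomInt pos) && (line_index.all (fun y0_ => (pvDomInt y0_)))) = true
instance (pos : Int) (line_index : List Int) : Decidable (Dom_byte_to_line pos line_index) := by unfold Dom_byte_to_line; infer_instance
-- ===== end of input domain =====

-- B replaces A's hand-written binary search with a single linear count of entries ≤ pos (simpler; equal whenever line_index is partitioned around pos, e.g. any sorted table).

-- ===== PORT A =====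
-- the while loop of A, ported as recursion on the shrinking interval [lo, hi]
def byteToLineGo (pos : Int) (line_index : List Int) (lo hi : Int) : Int :=
  if h : lo ≤ hi then
    let mid := PySem.Int.floordiv (lo + hi) 2
    -- line_index[mid]: mid is always in range on reachable states (0 ≤ lo, hi < len); pyGet? is exact, default unreachable
    if (PySem.List.pyGet? line_index mid).getD 0 ≤ pos then
      byteToLineGo pos line_index (mid + 1) hi
    else
      byteToLineGo pos line_index lo (mid - 1)
  else hi + 1
termination_by (hi + 1 - lo).toNat
decreasing_by
  · have := PySem.Int.floordiv_two_mid_bounds h; omega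
  · have := PySem.Int.floordiv_two_mid_bounds h; omega

def byte_to_line (pos : Int) (line_index : List Int) : Int :=
  byteToLineGo pos line_index 0 (line_index.length - 1)

-- ===== PORT B =====
-- sum(1 for x in line_index if x <= pos)
def byte_to_line_alt (pos : Int) (line_index : List Int) : Int :=
  ((line_index.map (fun x => if x ≤ pos then (1 : Int) else 0)).sum)

-- ===== PRECONDITION & SPEC =====
-- Pre_ excludes inputs whose list is not partitioned around pos (an entry > pos occurring before
-- an entry ≤ pos): the function's purpose is lookup in a sorted table of line-start offsets, and on
-- such inputs A's returned value is an accidental artifact of the binary-search path, unspecified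
-- either way. (Every sorted table satisfies Pre_ for every pos.)
def Pre_byte_to_line (pos : Int) (line_index : List Int) : Prop :=
  List.Pairwise (fun a b => b ≤ pos → a ≤ pos) line_index
instance (pos : Int) (line_index : List Int) : Decidable (Pre_byte_to_line pos line_index) := by
  unfold Pre_byte_to_line; infer_instance

def pvWitness_byte_to_line : Int × List Int := (7, [0, 3, 9, 15])

def Spec_byte_to_line (pos : Int) (line_index : List Int) (out : Int) : Prop := out = byte_to_line_alt pos line_index
instance (pos : Int) (line_index : List Int) (out : Int) : Decidable (Spec_byte_to_line pos line_index out) := by unfold Spec_byte_to_line; infer_instance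

-- ===== CLAIM (what is proved, stated in full; the proofs are below) =====
def Claim_equal_byte_to_line : Prop := ∀ (pos : Int) (line_index : List Int), Dom_byte_to_line pos line_index → Pre_byte_to_line pos line_index → Spec_byte_to_line pos line_index (byte_to_line pos line_index)

-- ===== LEMMAS AND PROOFS =====

-- B's 0/1-sum counts the entries ≤ pos
lemma alt_eq_countP (pos : Int) (xs : List Int) :
    byte_to_line_alt pos xs = (xs.countP (fun x => decide (x ≤ pos)) : Int) := by
  unfold byte_to_line_alt
  induction xs with
  | nil => simp
  | cons a t ih =>
      by_cases h : a ≤ pos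
      · simp [h, ih]; ring
      · simp [h, ih]

-- partition characterisation: if the first k elements are ≤ pos and the rest are > pos, the count is k
lemma countP_of_partition (pos : Int) (xs : List Int) (k : Int)
    (hk0 : 0 ≤ k) (hkn : k ≤ xs.length)
    (hlow : ∀ (i : Nat) (h : i < xs.length), (i : Int) < k → xs[i] ≤ pos)
    (hhigh : ∀ (i : Nat) (h : i < xs.length), k ≤ (i : Int) → ¬ xs[i] ≤ pos) :
    (xs.countP (fun x => decide (x ≤ pos)) : Int) = k := by
  induction xs generalizing k with
  | nil => simp at hkn ⊢; omega
  | cons a t ih =>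
      by_cases hk : k = 0
      · subst hk
        have hall : ∀ x ∈ a :: t, ¬ x ≤ pos := by
          intro x hx
          obtain ⟨i, hi, rfl⟩ := List.mem_iff_getElem.mp hx
          exact hhigh i hi (by positivity)
        rw [List.countP_eq_zero.mpr (by intro x hx; simpa using hall x hx)]
        rfl
      · have ha : a ≤ pos := hlow 0 (by simp) (by omega)
        have : (t.countP (fun x => decide (x ≤ pos)) : Int) = k - 1 := by
          apply ih (k - 1) (by omega) (by simp at hkn; omega)
          · intro i hi hik
            have := hlow (i + 1) (by simpa using Nat.succ_lt_succ hi) (by push_cast; omega)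
            simpa using this
          · intro i hi hik
            have := hhigh (i + 1) (by simpa using Nat.succ_lt_succ hi) (by push_cast; omega)
            simpa using this
        rw [List.countP_cons]
        simp only [ha, decide_true]
        push_cast
        omega

-- the loop invariant: for sorted xs, with all indices < lo known ≤ pos and all indices > hi known > pos,
-- the loop returns the number of entries ≤ pos
lemma byteToLineGo_eq (pos : Int) (xs : List Int)
    (hs : List.Pairwise (fun a b => b ≤ pos → a ≤ pos) xs) :
    ∀ (lo hi : Int), 0 ≤ lo → hi < xs.length → lo ≤ hi + 1 →
    (∀ (i : Nat) (h : i < xs.length), (i : Int) < lo → xs[i] ≤ pos) →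
    (∀ (i : Nat) (h : i < xs.length), hi < (i : Int) → ¬ xs[i] ≤ pos) →
    byteToLineGo pos xs lo hi = (xs.countP (fun x => decide (x ≤ pos)) : Int) := by
  intro lo hi
  induction lo, hi using byteToLineGo.induct pos xs with
  | case1 lo hi h mid hle ih =>
      intro hlo hhi hlohi hlow hhigh
      have hmid := PySem.Int.floordiv_two_mid_bounds h
      have hmn : mid.toNat < xs.length := by simp only [mid]; omega
      have hget : (PySem.List.pyGet? xs mid).getD 0 = xs[mid.toNat] := by
        rw [show PySem.List.pyGet? xs mid = xs[mid.toNat]? from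
            PySem.List.pyGet?_of_nonneg xs (by simp only [mid]; omega),
          List.getElem?_eq_getElem hmn]
        rfl
      rw [hget] at hle
      rw [byteToLineGo]
      simp only [dif_pos h]
      rw [if_pos (by rw [hget]; exact hle)]
      apply ih (by simp only [mid]; omega) hhi (by simp only [mid]; omega)
      · intro i hi' hilt
        by_cases hcm : (i : Int) < lo
        · exact hlow i hi' hcm
        · rcases lt_or_eq_of_le (show i ≤ mid.toNat by simp only [mid] at hilt ⊢; omega) with hlt | heq
          · exact (List.pairwise_iff_getElem.mp hs) i mid.toNat hi' hmn hlt hle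
          · subst heq; exact hle
      · exact hhigh
  | case2 lo hi h mid hgt ih =>
      intro hlo hhi hlohi hlow hhigh
      have hmid := PySem.Int.floordiv_two_mid_bounds h
      have hmn : mid.toNat < xs.length := by simp only [mid]; omega
      have hget : (PySem.List.pyGet? xs mid).getD 0 = xs[mid.toNat] := by
        rw [show PySem.List.pyGet? xs mid = xs[mid.toNat]? from
            PySem.List.pyGet?_of_nonneg xs (by simp only [mid]; omega),
          List.getElem?_eq_getElem hmn]
        rfl
      rw [hget] at hgt
      rw [byteToLineGo]
      simp only [dif_pos h]
      rw [if_neg (by rw [hget]; exact hgt)]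
      apply ih hlo (by simp only [mid]; omega) (by simp only [mid]; omega) hlow
      · intro i hi' higt
        by_cases hcm : hi < (i : Int)
        · exact hhigh i hi' hcm
        · rcases lt_or_eq_of_le (show mid.toNat ≤ i by simp only [mid] at higt ⊢; omega) with hlt | heq
          · intro hc
            exact hgt ((List.pairwise_iff_getElem.mp hs) mid.toNat i hmn hi' hlt hc)
          · subst heq; exact hgt
  | case3 lo hi h =>
      intro hlo hhi hlohi hlow hhigh
      rw [byteToLineGo]
      simp only [dif_neg h]
      rw [countP_of_partition pos xs (hi + 1) (by omega) (by omega)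
        (fun i hi' hik => hlow i hi' (by omega))
        (fun i hi' hik => hhigh i hi' (by omega))]

-- ===== VERDICT (by name: the statement is the Claim_ definition above) =====
theorem byte_to_line_spec : Claim_equal_byte_to_line := by
  intro pos xs _ hpre
  unfold Spec_byte_to_line byte_to_line
  rw [alt_eq_countP]
  exact byteToLineGo_eq pos xs hpre 0 (xs.length - 1) le_rfl (by omega) (by omega)
    (fun i hi hlt => absurd hlt (by omega)) (fun i hi hgt => absurd hgt (by omega))
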